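-- pv_equiv track=rewrite | github.com/BioJoe-Hzh/vcf_qc | useful_scripts/Add_GQ_from_PL.py | add_gq_header
-- ===== SOURCE A (Python) =====
-- from typing import List, Optional, Tuple, Dict, Any, Iterable
--
-- def add_gq_header(headers: List[str]) -> List[str]:
--     """Insert GQ FORMAT header if absent (before #CHROM or after last FORMAT)."""
--     if any(h.startswith('##FORMAT=<ID=GQ,') for h in headers):
--         return headers
--     insert_idx = 0
--     for i, h in enumerate(headers):
--         if h.startswith('##FORMAT='):
--             insert_idx = i + 1
--         if h.startswith('#CHROM'):
--             break
--     headers.insert(insert_idx, '##FORMAT=<ID=GQ,Number=1,Type=Integer,Description="Genotype Quality">')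
--     return headers
-- ===== SOURCE B (Python) =====
-- GQ_LINE = '##FORMAT=<ID=GQ,Number=1,Type=Integer,Description="Genotype Quality">'
--
--
-- def add_gq_header(headers):
--     """Insert GQ FORMAT header if absent (before #CHROM or after last FORMAT)."""
--     if any(h.startswith('##FORMAT=<ID=GQ,') for h in headers):
--         return headers
--     # Single pass maintaining two output segments: `before` holds everything up to
--     # and including the last ##FORMAT= line seen so far (pre-#CHROM), `pending` the
--     # lines after it.  The GQ line goes exactly between the two segments.
--     before, pending = [], []
--     it = iter(headers)
--     for h in it:
--         if h.startswith('#CHROM'):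
--             pending.append(h)
--             pending.extend(it)
--             break
--         if h.startswith('##FORMAT='):
--             before.extend(pending)
--             before.append(h)
--             pending = []
--         else:
--             pending.append(h)
--     headers[:] = before + [GQ_LINE] + pending
--     return headers
-- ===== Notes on version B (the rewrite author's own statement) =====
-- stated objective: alternative
-- what changed: Replaces A's insert_idx-tracking scan plus list.insert with a segment-accumulating pass: the output is built as two growing segments (everything up to the last pre-#CHROM FORMAT line, and the rest) and the GQ line is concatenated between them; no index arithmetic or insert call, same in-place mutation via slice assignment.
import Mathlib
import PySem

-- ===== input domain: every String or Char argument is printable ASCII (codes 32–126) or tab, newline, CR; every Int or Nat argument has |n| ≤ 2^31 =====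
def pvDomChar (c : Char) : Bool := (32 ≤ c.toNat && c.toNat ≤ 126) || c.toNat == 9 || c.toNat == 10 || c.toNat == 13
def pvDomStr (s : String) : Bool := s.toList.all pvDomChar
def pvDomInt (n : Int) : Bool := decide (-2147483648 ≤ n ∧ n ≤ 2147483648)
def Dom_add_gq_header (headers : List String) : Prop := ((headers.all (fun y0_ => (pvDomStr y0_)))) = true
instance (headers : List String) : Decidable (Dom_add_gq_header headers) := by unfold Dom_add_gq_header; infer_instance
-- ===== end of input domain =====

-- B replaces A's insert_idx-tracking scan + list.insert with a segment-accumulating pass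
-- that builds the output as two segments and concatenates the GQ line between them
-- (objective: alternative). Both Pythons mutate `headers` in place the same way; the
-- equivalence proved is about the return value.

-- ===== PORT A =====
def pvGQLine : String := "##FORMAT=<ID=GQ,Number=1,Type=Integer,Description=\"Genotype Quality\">"

-- the 'for i, h in enumerate(headers)' loop with break, carrying insert_idx
def pvALoop : List (Int × String) → Int → Int
  | [], acc => acc
  | (i, h) :: rest, acc =>
    let acc' := if PySem.Str.startswith h "##FORMAT=" then i + 1 else acc
    if PySem.Str.startswith h "#CHROM" then acc' else pvALoop rest acc'

def add_gq_header (headers : List String) : List String :=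
  if headers.any (fun h => PySem.Str.startswith h "##FORMAT=<ID=GQ,") then headers
  else
    let insert_idx := pvALoop (PySem.List.enumerate headers 0) 0
    PySem.List.insert headers insert_idx pvGQLine

-- ===== PORT B =====
-- Source B's loop over the iterator, carrying the two segments `before` and `pending`
def pvBLoop : List String → List String → List String → List String × List String
  | [], before, pending => (before, pending)
  | h :: rest, before, pending =>
    if PySem.Str.startswith h "#CHROM" then (before, pending ++ h :: rest)
    else if PySem.Str.startswith h "##FORMAT=" then pvBLoop rest (before ++ pending ++ [h]) []
    else pvBLoop rest before (pending ++ [h])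

def add_gq_header_alt (headers : List String) : List String :=
  if headers.any (fun h => PySem.Str.startswith h "##FORMAT=<ID=GQ,") then headers
  else
    let bp := pvBLoop headers [] []
    bp.1 ++ pvGQLine :: bp.2

-- ===== PRECONDITION & SPEC =====
def Spec_add_gq_header (headers : List String) (out : List String) : Prop := out = add_gq_header_alt headers
instance (headers : List String) (out : List String) : Decidable (Spec_add_gq_header headers out) := by unfold Spec_add_gq_header; infer_instance

-- ===== CLAIM =====
def Claim_equal_add_gq_header : Prop := ∀ (headers : List String), Dom_add_gq_header headers → Spec_add_gq_header headers (add_gq_header headers)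

-- ===== LEMMAS AND PROOFS =====

-- no string starts with both "##FORMAT=" and "#CHROM"
theorem pv_not_both (h : String) :
    ¬ (PySem.Str.startswith h "##FORMAT=" = true ∧ PySem.Str.startswith h "#CHROM" = true) := by
  rintro ⟨h1, h2⟩
  simp only [PySem.Str.startswith_eq, PySem.Chars.startswith_iff] at h1 h2
  rcases List.prefix_or_prefix_of_prefix h1 h2 with hp | hp
  · revert hp; decide
  · revert hp; decide

-- main invariant: B's two segments partition the whole list, and A's fused scan
-- computes exactly the length of B's first segment (the insertion point)
theorem pv_key (hs before pending : List String) :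
    (pvBLoop hs before pending).1 ++ (pvBLoop hs before pending).2
        = before ++ pending ++ hs ∧
    pvALoop (PySem.List.enumerate hs ((before.length + pending.length : Nat) : Int))
        ((before.length : Nat) : Int)
      = (((pvBLoop hs before pending).1.length : Nat) : Int) := by
  induction hs generalizing before pending with
  | nil => simp [pvBLoop, PySem.List.enumerate_nil, pvALoop]
  | cons h t ih =>
    rw [PySem.List.enumerate_cons]
    cases hc : PySem.Str.startswith h "#CHROM" with
    | true =>
      have hf : PySem.Str.startswith h "##FORMAT=" = false := by
        cases hff : PySem.Str.startswith h "##FORMAT="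
        · rfl
        · exact absurd ⟨hff, hc⟩ (pv_not_both h)
      constructor
      · simp only [pvBLoop, hc, if_true]
        simp
      · simp only [pvALoop, pvBLoop, hc, hf, Bool.false_eq_true, if_false, if_true]
    | false =>
      simp only [pvALoop, pvBLoop, hc, Bool.false_eq_true, if_false]
      cases hf : PySem.Str.startswith h "##FORMAT=" with
      | true =>
        simp only [if_true]
        have := ih (before ++ pending ++ [h]) []
        constructor
        · rw [this.1]; simp
        · have hacc : ((before.length + pending.length : Nat) : Int) + 1
              = (((before ++ pending ++ [h]).length + ([] : List String).length : Nat) : Int) := by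
            simp only [List.length_append, List.length_nil, List.length_cons]; push_cast; ring
          rw [hacc]
          have h2 := this.2
          have hacc2 : (((before ++ pending ++ [h]).length : Nat) : Int)
              = (((before ++ pending ++ [h]).length + ([] : List String).length : Nat) : Int) := by simp
          rw [hacc2] at h2
          exact h2
      | false =>
        simp only [Bool.false_eq_true, if_false]
        have := ih before (pending ++ [h])
        constructor
        · rw [this.1]; simp
        · have hlen : (before.length + (pending ++ [h]).length : Nat)
              = before.length + pending.length + 1 := by simp; omega
          have hcast : ((before.length + pending.length : Nat) : Int) + 1
              = ((before.length + pending.length + 1 : Nat) : Int) := by push_cast; ring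
          rw [hcast, ← hlen]
          exact this.2

-- ===== VERDICT =====
theorem add_gq_header_spec : Claim_equal_add_gq_header := by
  intro headers _
  unfold Spec_add_gq_header add_gq_header add_gq_header_alt
  cases hg : headers.any (fun h => PySem.Str.startswith h "##FORMAT=<ID=GQ,") with
  | true => simp
  | false =>
    simp only [Bool.false_eq_true, if_false]
    obtain ⟨hpart, hrun⟩ := pv_key headers [] []
    simp only [List.nil_append, List.length_nil, Nat.add_zero, Nat.cast_zero] at hpart hrun
    rcases hbp : pvBLoop headers [] [] with ⟨b, p⟩
    rw [hbp] at hpart hrun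
    simp only [hbp]
    subst hpart
    rw [hrun, PySem.List.insert_natCast (b ++ p) b.length pvGQLine (by simp),
      List.take_left, List.drop_left]
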